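-- pv_equiv track=rewrite | github.com/senapk/tko | src/tko/game/task_parser.py | filter_task_key
-- ===== SOURCE A (Python) =====
-- def filter_task_key(key: str) -> str:
--     allowed = "0123456789abcdefghijklmnopqrstuvwxyzABCDEFGHIJKLMNOPQRSTUVWXYZ_+"
--     new_key = ""
--     for c in key:
--         if c in allowed:
--             new_key += c
--         else:
--             break
--     return new_key
-- ===== SOURCE B (Python) =====
-- def filter_task_key(key: str) -> str:
--     allowed = "0123456789abcdefghijklmnopqrstuvwxyzABCDEFGHIJKLMNOPQRSTUVWXYZ_+"
--     return key[:len(key) - len(key.lstrip(allowed))]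
-- ===== Notes on version B (the rewrite author's own statement) =====
-- stated objective: idiomatic
-- what changed: Replaces the explicit loop-with-break and per-character string concatenation by a loop-free expression: str.lstrip with the allowed character set removes exactly the maximal leading allowed run, so the prefix length is len(key)-len(lstripped) and a single slice returns it.
import Mathlib
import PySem

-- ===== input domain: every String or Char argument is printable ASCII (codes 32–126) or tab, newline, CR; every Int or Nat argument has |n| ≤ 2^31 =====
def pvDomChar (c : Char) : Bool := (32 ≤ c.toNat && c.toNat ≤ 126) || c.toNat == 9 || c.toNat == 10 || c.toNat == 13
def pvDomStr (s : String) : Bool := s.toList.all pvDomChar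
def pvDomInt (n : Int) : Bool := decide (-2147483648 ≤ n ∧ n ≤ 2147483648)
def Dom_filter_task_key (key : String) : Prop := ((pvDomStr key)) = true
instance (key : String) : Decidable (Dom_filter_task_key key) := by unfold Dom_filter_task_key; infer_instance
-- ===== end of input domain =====

-- ===== PORT A =====
-- B changes only the mechanism: the loop-and-break is replaced by lstrip + slice (idiomatic, loop-free).
def pvAllowed : List Char :=
  "0123456789abcdefghijklmnopqrstuvwxyzABCDEFGHIJKLMNOPQRSTUVWXYZ_+".toList

-- the 'for c in key: if c in allowed: new_key += c else: break' loop, acc = new_key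
def pvLoopA : List Char → List Char → List Char
  | acc, [] => acc
  | acc, c :: rest => if pvAllowed.contains c then pvLoopA (acc ++ [c]) rest else acc

def filter_task_key (key : String) : String :=
  String.mk (pvLoopA [] key.toList)

-- ===== PORT B =====
-- key.lstrip(allowed) drops the maximal leading run of allowed chars; key[:len(key)-len(stripped)]
def filter_task_key_alt (key : String) : String :=
  let stripped := key.toList.dropWhile (fun c => pvAllowed.contains c)
  String.mk (key.toList.take (key.toList.length - stripped.length))

-- ===== PRECONDITION & SPEC =====
def Spec_filter_task_key (key : String) (out : String) : Prop := out = filter_task_key_alt key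
instance (key : String) (out : String) : Decidable (Spec_filter_task_key key out) := by unfold Spec_filter_task_key; infer_instance

-- ===== CLAIM (what is proved, stated in full; the proofs are below) =====
def Claim_equal_filter_task_key : Prop := ∀ (key : String), Dom_filter_task_key key → Spec_filter_task_key key (filter_task_key key)

-- ===== LEMMAS AND PROOFS =====
theorem pvLoopA_eq_takeWhile (l acc : List Char) :
    pvLoopA acc l = acc ++ l.takeWhile (fun c => pvAllowed.contains c) := by
  induction l generalizing acc with
  | nil => simp [pvLoopA]
  | cons c rest ih =>
    rw [List.takeWhile_cons]
    by_cases h : pvAllowed.contains c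
    · simp only [pvLoopA, h, if_true, ih]; simp
    · simp only [pvLoopA, h, if_false, Bool.false_eq_true]; simp

theorem pvTake_eq_takeWhile (l : List Char) :
    l.take (l.length - (l.dropWhile (fun c => pvAllowed.contains c)).length)
      = l.takeWhile (fun c => pvAllowed.contains c) := by
  have hsplit : l.takeWhile (fun c => pvAllowed.contains c)
      ++ l.dropWhile (fun c => pvAllowed.contains c) = l := List.takeWhile_append_dropWhile
  have hlen : l.length - (l.dropWhile (fun c => pvAllowed.contains c)).length
      = (l.takeWhile (fun c => pvAllowed.contains c)).length := by
    have h2 : (l.takeWhile (fun c => pvAllowed.contains c)).length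
        + (l.dropWhile (fun c => pvAllowed.contains c)).length = l.length := by
      conv_rhs => rw [← hsplit]
      rw [List.length_append]
    omega
  rw [hlen]
  have hpre : l.takeWhile (fun c => pvAllowed.contains c) <+: l :=
    ⟨l.dropWhile (fun c => pvAllowed.contains c), hsplit⟩
  exact (List.prefix_iff_eq_take.mp hpre).symm

-- ===== VERDICT (by name: the statement is the Claim_ definition above) =====
theorem filter_task_key_spec : Claim_equal_filter_task_key := by
  intro key _
  unfold Spec_filter_task_key filter_task_key filter_task_key_alt
  rw [pvLoopA_eq_takeWhile]
  show _ = String.mk (List.take _ _)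
  rw [pvTake_eq_takeWhile]
  simp
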